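-- pv_equiv track=rewrite | github.com/Warrenpoobear/biotech-screener | common/clustering.py | build_indication_clusters
-- ===== SOURCE A (Python) =====
-- from typing import Dict, List, Optional, Set, Tuple, Any
--
-- def build_indication_clusters(
--     ranked_securities: List[Dict[str, Any]],
--     indication_key: str = "primary_indication",
--     ticker_key: str = "ticker",
-- ) -> Dict[str, int]:
--     """
--     Build clusters based on therapeutic indication (fallback when no returns).
--
--     This is a metadata-based approximation when correlation data is unavailable.
--     Stocks targeting the same indication often have correlated returns.
--
--     Args:
--         ranked_securities: List of security dicts
--         indication_key: Field name for therapeutic indication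
--         ticker_key: Field name for ticker
--
--     Returns:
--         {ticker: cluster_id}
--     """
--     # Group by indication
--     indication_groups: Dict[str, List[str]] = {}
--
--     for r in ranked_securities:
--         ticker = r.get(ticker_key)
--         indication = r.get(indication_key, "Unknown")
--
--         if not ticker:
--             continue
--
--         if indication not in indication_groups:
--             indication_groups[indication] = []
--         indication_groups[indication].append(ticker)
--
--     # Sort indications alphabetically for determinism
--     sorted_indications = sorted(indication_groups.keys())
--
--     # Assign cluster IDs
--     cluster_map: Dict[str, int] = {}
--     for cluster_id, indication in enumerate(sorted_indications, start=1):
--         for ticker in sorted(indication_groups[indication]):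
--             cluster_map[ticker] = cluster_id
--
--     return cluster_map
-- ===== SOURCE B (Python) =====
-- def build_indication_clusters(
--     ranked_securities,
--     indication_key="primary_indication",
--     ticker_key="ticker",
-- ):
--     """Cluster tickers by indication via one global sort of (indication, ticker)
--     pairs followed by a single linear grouping pass."""
--     pairs = [
--         (r.get(indication_key, "Unknown"), r.get(ticker_key))
--         for r in ranked_securities
--         if r.get(ticker_key)
--     ]
--     cluster_map = {}
--     prev = None
--     cluster_id = 0
--     for indication, ticker in sorted(pairs):
--         if prev is None or indication != prev:
--             cluster_id += 1
--             prev = indication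
--         cluster_map[ticker] = cluster_id
--     return cluster_map
-- ===== Notes on version B (the rewrite author's own statement) =====
-- stated objective: idiomatic
-- what changed: Replaces the dict-of-lists grouping plus separate sorts of the keys and of each group's ticker list with one flat extraction of (indication, ticker) pairs, a single global sort, and one linear pass that bumps the cluster id whenever the indication changes.
import Mathlib
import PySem

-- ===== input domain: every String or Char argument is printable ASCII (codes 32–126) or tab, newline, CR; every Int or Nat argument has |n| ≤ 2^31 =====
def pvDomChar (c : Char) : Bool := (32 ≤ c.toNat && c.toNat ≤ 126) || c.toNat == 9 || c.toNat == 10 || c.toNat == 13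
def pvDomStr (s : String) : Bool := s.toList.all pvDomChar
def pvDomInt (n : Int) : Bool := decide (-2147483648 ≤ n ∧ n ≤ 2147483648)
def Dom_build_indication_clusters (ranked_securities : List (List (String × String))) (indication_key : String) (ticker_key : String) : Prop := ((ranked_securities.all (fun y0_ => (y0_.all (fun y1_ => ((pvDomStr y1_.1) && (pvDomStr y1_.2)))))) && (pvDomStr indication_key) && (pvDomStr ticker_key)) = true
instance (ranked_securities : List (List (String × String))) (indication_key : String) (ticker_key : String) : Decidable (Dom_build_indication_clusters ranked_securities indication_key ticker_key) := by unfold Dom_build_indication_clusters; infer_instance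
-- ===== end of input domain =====

-- B replaces A's group-by-dict + per-group sorts with one global sort of (indication, ticker)
-- pairs and a single linear grouping pass (idiomatic, same cost).

-- ===== PORT A =====
def build_indication_clusters (ranked_securities : List (List (String × String))) (indication_key : String) (ticker_key : String) : List (String × Int) :=
  -- group by indication
  let groups : PySem.Dict String (List String) :=
    ranked_securities.foldl (fun g r =>
      match (PySem.Dict.mk r).get? ticker_key with
      | none => g
      | some ticker =>
        if ticker = "" then g
        else g.modify ((PySem.Dict.mk r).getD indication_key "Unknown") [] (· ++ [ticker]))
      PySem.Dict.empty
  -- sort indications alphabetically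
  let sorted_indications := PySem.List.sorted groups.keys (fun x => x) false
  -- assign cluster IDs (state = (next cluster_id, cluster_map))
  let cluster_map :=
    sorted_indications.foldl (fun (st : Int × PySem.Dict String Int) indication =>
      (st.1 + 1,
       (PySem.List.sorted (groups.getD indication []) (fun x => x) false).foldl
         (fun m t => m.insert t st.1) st.2))
      (1, PySem.Dict.empty)
  cluster_map.2.items

-- ===== PORT B =====
def build_indication_clusters_alt (ranked_securities : List (List (String × String))) (indication_key : String) (ticker_key : String) : List (String × Int) :=
  -- flat list of (indication, ticker) pairs, skipping falsy tickers
  let pairs : List (String × String) :=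
    ranked_securities.foldl (fun acc r =>
      match (PySem.Dict.mk r).get? ticker_key with
      | none => acc
      | some ticker =>
        if ticker = "" then acc
        else acc ++ [((PySem.Dict.mk r).getD indication_key "Unknown", ticker)]) []
  -- one global sort, then a linear pass (state = (prev indication, cluster_id, cluster_map))
  let final :=
    (PySem.List.sorted pairs (fun p => toLex p) false).foldl
      (fun (st : Option String × Int × PySem.Dict String Int) p =>
        if st.1 = some p.1 then (some p.1, st.2.1, st.2.2.insert p.2 st.2.1)
        else (some p.1, st.2.1 + 1, st.2.2.insert p.2 (st.2.1 + 1)))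
      (none, 0, PySem.Dict.empty)
  final.2.2.items

-- ===== PRECONDITION & SPEC =====
def Spec_build_indication_clusters (ranked_securities : List (List (String × String))) (indication_key : String) (ticker_key : String) (out : List (String × Int)) : Prop := out = build_indication_clusters_alt ranked_securities indication_key ticker_key
instance (ranked_securities : List (List (String × String))) (indication_key : String) (ticker_key : String) (out : List (String × Int)) : Decidable (Spec_build_indication_clusters ranked_securities indication_key ticker_key out) := by unfold Spec_build_indication_clusters; infer_instance

-- ===== CLAIM (what is proved, stated in full; the proofs are below) =====
def Claim_equal_build_indication_clusters : Prop := ∀ (ranked_securities : List (List (String × String))) (indication_key : String) (ticker_key : String), Dom_build_indication_clusters ranked_securities indication_key ticker_key → Spec_build_indication_clusters ranked_securities indication_key ticker_key (build_indication_clusters ranked_securities indication_key ticker_key)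

-- ===== LEMMAS AND PROOFS =====

-- the valid (indication, ticker) pair a row contributes, if any
def pvPair (indication_key ticker_key : String) (r : List (String × String)) : Option (String × String) :=
  match (PySem.Dict.mk r).get? ticker_key with
  | none => none
  | some ticker => if ticker = "" then none else some ((PySem.Dict.mk r).getD indication_key "Unknown", ticker)

lemma pairs_eq_filterMap (ik tk : String) (rs : List (List (String × String))) (acc : List (String × String)) :
    rs.foldl (fun acc r =>
      match (PySem.Dict.mk r).get? tk with
      | none => acc
      | some ticker => if ticker = "" then acc else acc ++ [((PySem.Dict.mk r).getD ik "Unknown", ticker)]) acc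
    = acc ++ rs.filterMap (pvPair ik tk) := by
  induction rs generalizing acc with
  | nil => simp
  | cons r rs ih =>
    simp only [List.foldl_cons, List.filterMap_cons, pvPair]
    cases h : (PySem.Dict.mk r).get? tk with
    | none => simp [ih]; rfl
    | some t =>
      by_cases ht : t = "" <;> simp [ht, ih] <;> rfl

lemma groups_eq_pairs_fold (ik tk : String) (rs : List (List (String × String))) (d : PySem.Dict String (List String)) :
    rs.foldl (fun g r =>
      match (PySem.Dict.mk r).get? tk with
      | none => g
      | some ticker => if ticker = "" then g else g.modify ((PySem.Dict.mk r).getD ik "Unknown") [] (· ++ [ticker])) d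
    = (rs.filterMap (pvPair ik tk)).foldl (fun g p => g.modify p.1 [] (· ++ [p.2])) d := by
  induction rs generalizing d with
  | nil => simp
  | cons r rs ih =>
    simp only [List.foldl_cons, List.filterMap_cons, pvPair]
    cases h : (PySem.Dict.mk r).get? tk with
    | none => simp [ih]; rfl
    | some t =>
      by_cases ht : t = "" <;> simp [ht, ih] <;> rfl

-- a nodup key list covering all firsts: flatMap of filters is a permutation
lemma perm_flatMap_filter (ks : List String) (ps : List (String × String)) (hnd : ks.Nodup)
    (hcov : ∀ p ∈ ps, p.1 ∈ ks) :
    (ks.flatMap (fun i => ps.filter (fun p => p.1 == i))).Perm ps := by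
  induction ks generalizing ps with
  | nil =>
    have : ps = [] := List.eq_nil_iff_forall_not_mem.mpr (fun p hp => by simpa using hcov p hp)
    simp [this]
  | cons k ks ih =>
    simp only [List.flatMap_cons]
    have hsub : ∀ i ∈ ks, ps.filter (fun p => p.1 == i)
        = (ps.filter (fun p => !(p.1 == k))).filter (fun p => p.1 == i) := by
      intro i hi
      rw [List.filter_filter]
      apply List.filter_congr
      intro p _
      by_cases h : p.1 = i
      · have : i ≠ k := fun e => (List.nodup_cons.mp hnd).1 (e ▸ hi)
        simp [h, this]
      · simp [h]
    have hflat : ks.flatMap (fun i => ps.filter (fun p => p.1 == i))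
        = ks.flatMap (fun i => (ps.filter (fun p => !(p.1 == k))).filter (fun p => p.1 == i)) :=
      List.flatMap_congr (fun i hi => hsub i hi)
    rw [hflat]
    have ihp := ih (ps.filter (fun p => !(p.1 == k))) (List.nodup_cons.mp hnd).2 (by
      intro p hp
      have hm := List.mem_filter.mp hp
      have := hcov p hm.1
      simp at this ⊢
      rcases this with h | h
      · exact absurd (by simpa [h] : _) (by simpa using hm.2)
      · exact h)
    exact (ihp.append_left _).trans (List.filter_append_perm _ ps)

lemma sorted_pairs_flatMap (P : List (String × String)) :
    PySem.List.sorted P (fun p => toLex p) false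
    = (PySem.List.sorted (PySem.Set.ofList (P.map (·.1))) (fun x => x) false).flatMap
        (fun i => (PySem.List.sorted ((P.filter (fun p => p.1 == i)).map (·.2)) (fun x => x) false).map
          (fun t => (i, t))) := by
  set inds := PySem.List.sorted (PySem.Set.ofList (P.map (·.1))) (fun x => x) false with hinds
  set RHS := inds.flatMap (fun i => (PySem.List.sorted ((P.filter (fun p => p.1 == i)).map (·.2)) (fun x => x) false).map (fun t => (i, t))) with hRHS
  have hndinds : inds.Nodup :=
    ((PySem.List.sorted_perm _ _ _).nodup_iff).mpr (PySem.Set.nodup_ofList _)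
  have hmeminds : ∀ i, i ∈ inds ↔ i ∈ P.map (·.1) := by
    intro i
    rw [hinds, PySem.List.mem_sorted, PySem.Set.mem_ofList]
  -- each block is a permutation of the corresponding filter
  have hblock : ∀ i, ((PySem.List.sorted ((P.filter (fun p => p.1 == i)).map (·.2)) (fun x => x) false).map (fun t => (i, t))).Perm (P.filter (fun p => p.1 == i)) := by
    intro i
    have h1 := (PySem.List.sorted_perm ((P.filter (fun p => p.1 == i)).map (·.2)) (fun x => x) false).map (fun t => (i, t))
    have h2 : ((P.filter (fun p => p.1 == i)).map (·.2)).map (fun t => (i, t)) = P.filter (fun p => p.1 == i) := by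
      rw [List.map_map]
      conv_rhs => rw [← List.map_id (P.filter (fun p => p.1 == i))]
      apply List.map_congr_left
      intro p hp
      have : p.1 = i := by simpa using (List.mem_filter.mp hp).2
      simp [Function.comp, ← this]
    rw [h2] at h1
    exact h1
  -- RHS is a permutation of P
  have hperm : RHS.Perm P := by
    have h1 : RHS.Perm (inds.flatMap (fun i => P.filter (fun p => p.1 == i))) := by
      exact List.Perm.flatMap_left inds (fun i _ => hblock i)
    exact h1.trans (perm_flatMap_filter inds P hndinds (fun p hp => (hmeminds p.1).mpr (List.mem_map.mpr ⟨p, hp, rfl⟩)))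
  -- RHS is sorted under toLex
  have hpw : RHS.Pairwise (fun a b => (toLex a : Lex (String × String)) ≤ toLex b) := by
    rw [hRHS, List.flatMap_def, List.pairwise_flatten]
    constructor
    · intro l hl
      obtain ⟨i, _, rfl⟩ := List.mem_map.mp hl
      rw [List.pairwise_map]
      exact (PySem.List.sorted_pairwise _ _).imp (fun {a b} h => by
        exact Prod.Lex.le_iff.mpr (Or.inr ⟨rfl, h⟩))
    · rw [List.pairwise_map]
      have := PySem.List.sorted_ofList_pairwise_lt (P.map (·.1))
      refine this.imp ?_
      intro i j hij x hx y hy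
      obtain ⟨tx, _, rfl⟩ := List.mem_map.mp hx
      obtain ⟨ty, _, rfl⟩ := List.mem_map.mp hy
      exact le_of_lt (Prod.Lex.lt_iff.mpr (Or.inl hij))
  -- conclude by uniqueness of sorted permutations
  exact PySem.List.eq_of_perm_of_pairwise_le_of_injective (fun p => toLex p) (fun a b h => by simpa using h)
    ((PySem.List.sorted_perm P _ false).trans hperm.symm)
    (PySem.List.sorted_pairwise P _) hpw

lemma blockB (i : String) (ts : List String) (c : Int) (m : PySem.Dict String Int) :
    (ts.map (fun t => (i, t))).foldl
      (fun (st : Option String × Int × PySem.Dict String Int) p =>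
        if st.1 = some p.1 then (some p.1, st.2.1, st.2.2.insert p.2 st.2.1)
        else (some p.1, st.2.1 + 1, st.2.2.insert p.2 (st.2.1 + 1)))
      (some i, c, m)
    = (some i, c, ts.foldl (fun mm t => mm.insert t c) m) := by
  induction ts generalizing m with
  | nil => rfl
  | cons t ts ih => simp [ih]

lemma foldB_flatMap (inds : List String) (hnd : inds.Nodup) (T : String → List String)
    (hne : ∀ i ∈ inds, T i ≠ []) (prev : Option String) (hprev : ∀ i ∈ inds, prev ≠ some i)
    (c : Int) (m : PySem.Dict String Int) :
    ((inds.flatMap (fun i => (T i).map (fun t => (i, t)))).foldl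
      (fun (st : Option String × Int × PySem.Dict String Int) p =>
        if st.1 = some p.1 then (some p.1, st.2.1, st.2.2.insert p.2 st.2.1)
        else (some p.1, st.2.1 + 1, st.2.2.insert p.2 (st.2.1 + 1)))
      (prev, c, m)).2.2
    = (inds.foldl (fun (st : Int × PySem.Dict String Int) i =>
        (st.1 + 1, (T i).foldl (fun mm t => mm.insert t st.1) st.2)) (c + 1, m)).2 := by
  induction inds generalizing prev c m with
  | nil => rfl
  | cons i rest ih =>
    obtain ⟨t, ts, hts⟩ : ∃ t ts, T i = t :: ts := by
      cases h : T i with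
      | nil => exact absurd h (hne i (by simp))
      | cons a b => exact ⟨a, b, rfl⟩
    simp only [List.flatMap_cons, List.foldl_append, List.foldl_cons, hts, List.map_cons]
    have h1 : prev ≠ some i := hprev i (by simp)
    rw [if_neg (by simpa using h1)]
    rw [blockB]
    rw [ih hnd.of_cons (fun j hj => hne j (by simp [hj])) (some i)
      (fun j hj h => by simp at h; exact (List.nodup_cons.mp hnd).1 (h ▸ hj)) (c + 1) _]

-- ===== VERDICT (by name: the statement is the Claim_ definition above) =====
theorem build_indication_clusters_spec : Claim_equal_build_indication_clusters := by
  intro rs ik tk _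
  unfold Spec_build_indication_clusters build_indication_clusters build_indication_clusters_alt
  rw [pairs_eq_filterMap ik tk rs [], groups_eq_pairs_fold ik tk rs PySem.Dict.empty]
  simp only [List.nil_append]
  set P := rs.filterMap (pvPair ik tk) with hP
  set G := P.foldl (fun g p => g.modify p.1 [] (· ++ [p.2])) PySem.Dict.empty with hG
  have hkeys : G.keys = PySem.Set.ofList (P.map (·.1)) := by
    rw [hG, PySem.Dict.keys_foldl_modify_key]
    simp [PySem.Set.update_nil_left]
  have hgetD : ∀ i, G.getD i [] = (P.filter (fun p => p.1 == i)).map (·.2) := by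
    intro i
    rw [hG, PySem.Dict.getD_foldl_modify_append]
    simp
  rw [sorted_pairs_flatMap P, hkeys]
  set inds := PySem.List.sorted (PySem.Set.ofList (P.map (·.1))) (fun x => x) false with hinds
  have hndinds : inds.Nodup :=
    ((PySem.List.sorted_perm _ _ _).nodup_iff).mpr (PySem.Set.nodup_ofList _)
  have hne : ∀ i ∈ inds, PySem.List.sorted ((P.filter (fun p => p.1 == i)).map (·.2)) (fun x => x) false ≠ [] := by
    intro i hi
    rw [Ne, PySem.List.sorted_eq_nil_iff]
    have : i ∈ P.map (·.1) := by
      rw [hinds, PySem.List.mem_sorted, PySem.Set.mem_ofList] at hi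
      exact hi
    obtain ⟨p, hp, rfl⟩ := List.mem_map.mp this
    simp only [List.map_eq_nil_iff, List.filter_eq_nil_iff]
    intro h
    exact absurd (h p hp) (by simp)
  have hfold := foldB_flatMap inds hndinds
    (fun i => PySem.List.sorted ((P.filter (fun p => p.1 == i)).map (·.2)) (fun x => x) false)
    hne none (fun i _ h => by cases h) 0 PySem.Dict.empty
  rw [hfold]
  have hfun : (fun (st : Int × PySem.Dict String Int) indication =>
        (st.1 + 1, (PySem.List.sorted (G.getD indication []) (fun x => x) false).foldl
          (fun m t => m.insert t st.1) st.2))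
      = (fun (st : Int × PySem.Dict String Int) i =>
        (st.1 + 1, (PySem.List.sorted ((P.filter (fun p => p.1 == i)).map (·.2)) (fun x => x) false).foldl
          (fun mm t => mm.insert t st.1) st.2)) := by
    funext st i
    rw [hgetD i]
  rw [hfun]
  norm_num
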